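-- pv_equiv track=rewrite | github.com/Alfred-ZinMinKhant/booppa_backend | app/services/pdf_service.py | _default_legal_references
-- ===== SOURCE A (Python) =====
-- def _default_legal_references(findings: list) -> list:
--     """Return default legal references based on finding types."""
--     # Core references — always included for any PDPA report
--     refs = [
--         {"title": "Personal Data Protection Act 2012 (Singapore)",
--          "url": "https://sso.agc.gov.sg/Act/PDPA2012"},
--         {"title": "PDPA Section 11 — Openness Obligation",
--          "url": "https://sso.agc.gov.sg/Act/PDPA2012#pr11-"},
--         {"title": "PDPA Section 13 — Consent Obligation",
--          "url": "https://sso.agc.gov.sg/Act/PDPA2012#pr13-"},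
--         {"title": "PDPA Section 24 — Protection Obligation",
--          "url": "https://sso.agc.gov.sg/Act/PDPA2012#pr24-"},
--         {"title": "PDPC Advisory Guidelines on Cookies (2021)",
--          "url": "https://www.pdpc.gov.sg/-/media/Files/PDPC/PDF-Files/Advisory-Guidelines/AG-on-Cookies-2021.pdf"},
--         {"title": "Guide to Enhanced Notice and Choice (2021)",
--          "url": "https://www.pdpc.gov.sg/guidelines-and-consultation/2021/01/guide-to-enhanced-notice-and-choice"},
--         {"title": "PDPC Advisory Guidelines on Key Concepts in the PDPA",
--          "url": "https://www.pdpc.gov.sg/guidelines-and-consultation/2020/03/advisory-guidelines-on-key-concepts-in-the-pdpa"},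
--     ]
--
--     # Contextual references — added when relevant findings are present
--     types_and_ids = set()
--     for f in findings:
--         types_and_ids.add(f.get("type") or "")
--         types_and_ids.add(f.get("check_id") or "")
--         types_and_ids.add((f.get("title") or "").lower())
--
--     combined = " ".join(types_and_ids)
--
--     if "marketing" in combined or "dnc" in combined or "do_not_call" in combined:
--         refs.append({"title": "PDPC DNC Registry Guidelines",
--                      "url": "https://www.pdpc.gov.sg/guidelines-and-consultation/guidelines/dnc-provisions"})
--         refs.append({"title": "Spam Control Act (Cap. 311A)",
--                      "url": "https://sso.agc.gov.sg/Act/SCA2007"})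
--
--     if "nric" in combined or "fin" in combined or "identity" in combined:
--         refs.append({"title": "PDPC Advisory Guidelines on NRIC Numbers (2018)",
--                      "url": "https://www.pdpc.gov.sg/guidelines-and-consultation/2018/01/advisory-guidelines-for-nric-numbers"})
--
--     if "dpo" in combined or "data protection officer" in combined or "organizational" in combined:
--         refs.append({"title": "PDPA Section 11(3) — DPO Designation & Public Disclosure",
--                      "url": "https://sso.agc.gov.sg/Act/PDPA2012#pr11-"})
--
--     if "breach" in combined or "notification" in combined:
--         refs.append({"title": "PDPA Part VIA — Data Breach Notification",
--                      "url": "https://sso.agc.gov.sg/Act/PDPA2012#PVIApr26A-"})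
--
--     return refs
-- ===== SOURCE B (Python) =====
-- # B: one streaming pass over the findings maintaining a saturating list of four
-- # boolean flags (one per reference group), with an early break once every flag is
-- # set; no set of tokens, no joined string, no staged texts list.
--
-- _CORE = [
--     {"title": "Personal Data Protection Act 2012 (Singapore)",
--      "url": "https://sso.agc.gov.sg/Act/PDPA2012"},
--     {"title": "PDPA Section 11 — Openness Obligation",
--      "url": "https://sso.agc.gov.sg/Act/PDPA2012#pr11-"},
--     {"title": "PDPA Section 13 — Consent Obligation",
--      "url": "https://sso.agc.gov.sg/Act/PDPA2012#pr13-"},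
--     {"title": "PDPA Section 24 — Protection Obligation",
--      "url": "https://sso.agc.gov.sg/Act/PDPA2012#pr24-"},
--     {"title": "PDPC Advisory Guidelines on Cookies (2021)",
--      "url": "https://www.pdpc.gov.sg/-/media/Files/PDPC/PDF-Files/Advisory-Guidelines/AG-on-Cookies-2021.pdf"},
--     {"title": "Guide to Enhanced Notice and Choice (2021)",
--      "url": "https://www.pdpc.gov.sg/guidelines-and-consultation/2021/01/guide-to-enhanced-notice-and-choice"},
--     {"title": "PDPC Advisory Guidelines on Key Concepts in the PDPA",
--      "url": "https://www.pdpc.gov.sg/guidelines-and-consultation/2020/03/advisory-guidelines-on-key-concepts-in-the-pdpa"},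
-- ]
--
-- _GROUPS = [
--     ("marketing", "dnc", "do_not_call"),
--     ("nric", "fin", "identity"),
--     ("dpo", "data protection officer", "organizational"),
--     ("breach", "notification"),
-- ]
--
-- _EXTRAS = [
--     [{"title": "PDPC DNC Registry Guidelines",
--       "url": "https://www.pdpc.gov.sg/guidelines-and-consultation/guidelines/dnc-provisions"},
--      {"title": "Spam Control Act (Cap. 311A)",
--       "url": "https://sso.agc.gov.sg/Act/SCA2007"}],
--     [{"title": "PDPC Advisory Guidelines on NRIC Numbers (2018)",
--       "url": "https://www.pdpc.gov.sg/guidelines-and-consultation/2018/01/advisory-guidelines-for-nric-numbers"}],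
--     [{"title": "PDPA Section 11(3) — DPO Designation & Public Disclosure",
--       "url": "https://sso.agc.gov.sg/Act/PDPA2012#pr11-"}],
--     [{"title": "PDPA Part VIA — Data Breach Notification",
--       "url": "https://sso.agc.gov.sg/Act/PDPA2012#PVIApr26A-"}],
-- ]
--
--
-- def _default_legal_references(findings: list) -> list:
--     flags = [False, False, False, False]
--     for f in findings:
--         if all(flags):
--             break  # every group already triggered: nothing left to learn
--         fields = (f.get("type") or "",
--                   f.get("check_id") or "",
--                   (f.get("title") or "").lower())
--         flags = [fl or any(kw in t for t in fields for kw in kws)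
--                  for fl, kws in zip(flags, _GROUPS)]
--     out = [dict(r) for r in _CORE]
--     for flag, extra in zip(flags, _EXTRAS):
--         if flag:
--             out.extend(dict(r) for r in extra)
--     return out
-- ===== Notes on version B (the rewrite author's own statement) =====
-- stated objective: alternative
-- what changed: A builds a set of type/check_id/lowered-title tokens, joins them into one space-separated string, and runs four independent if-blocks of substring tests on that blob; B never builds a set, join or texts list: it makes a single streaming pass over the findings carrying a saturating 4-flag accumulator (one flag per reference group, updated from each finding's three strings) with an early break once all flags are set, then emits the core list plus the flagged groups.
import Mathlib
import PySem

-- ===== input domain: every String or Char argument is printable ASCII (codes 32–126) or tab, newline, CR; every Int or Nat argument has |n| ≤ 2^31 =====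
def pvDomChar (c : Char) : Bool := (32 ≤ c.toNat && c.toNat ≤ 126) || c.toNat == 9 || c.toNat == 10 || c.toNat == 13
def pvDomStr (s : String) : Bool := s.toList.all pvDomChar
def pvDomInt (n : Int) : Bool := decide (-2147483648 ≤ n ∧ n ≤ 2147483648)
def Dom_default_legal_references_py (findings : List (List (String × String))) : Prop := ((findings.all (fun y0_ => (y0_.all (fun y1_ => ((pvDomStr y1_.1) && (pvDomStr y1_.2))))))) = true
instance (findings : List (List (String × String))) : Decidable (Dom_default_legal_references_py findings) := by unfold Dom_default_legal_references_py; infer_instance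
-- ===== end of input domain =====

-- B replaces A's set-union + " ".join + four if-blocks by ONE streaming pass over the findings
-- carrying a saturating list of four group flags with an early break (objective: alternative;
-- return-value equivalence only).

-- Shared reference data (literal dicts both versions return).
def pvCoreRefs : List (List (String × String)) := [
  [("title", "Personal Data Protection Act 2012 (Singapore)"), ("url", "https://sso.agc.gov.sg/Act/PDPA2012")],
  [("title", "PDPA Section 11 — Openness Obligation"), ("url", "https://sso.agc.gov.sg/Act/PDPA2012#pr11-")],
  [("title", "PDPA Section 13 — Consent Obligation"), ("url", "https://sso.agc.gov.sg/Act/PDPA2012#pr13-")],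
  [("title", "PDPA Section 24 — Protection Obligation"), ("url", "https://sso.agc.gov.sg/Act/PDPA2012#pr24-")],
  [("title", "PDPC Advisory Guidelines on Cookies (2021)"), ("url", "https://www.pdpc.gov.sg/-/media/Files/PDPC/PDF-Files/Advisory-Guidelines/AG-on-Cookies-2021.pdf")],
  [("title", "Guide to Enhanced Notice and Choice (2021)"), ("url", "https://www.pdpc.gov.sg/guidelines-and-consultation/2021/01/guide-to-enhanced-notice-and-choice")],
  [("title", "PDPC Advisory Guidelines on Key Concepts in the PDPA"), ("url", "https://www.pdpc.gov.sg/guidelines-and-consultation/2020/03/advisory-guidelines-on-key-concepts-in-the-pdpa")]]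

def pvRefDnc1 : List (String × String) :=
  [("title", "PDPC DNC Registry Guidelines"), ("url", "https://www.pdpc.gov.sg/guidelines-and-consultation/guidelines/dnc-provisions")]
def pvRefDnc2 : List (String × String) :=
  [("title", "Spam Control Act (Cap. 311A)"), ("url", "https://sso.agc.gov.sg/Act/SCA2007")]
def pvRefNric : List (String × String) :=
  [("title", "PDPC Advisory Guidelines on NRIC Numbers (2018)"), ("url", "https://www.pdpc.gov.sg/guidelines-and-consultation/2018/01/advisory-guidelines-for-nric-numbers")]
def pvRefDpo : List (String × String) :=
  [("title", "PDPA Section 11(3) — DPO Designation & Public Disclosure"), ("url", "https://sso.agc.gov.sg/Act/PDPA2012#pr11-")]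
def pvRefBreach : List (String × String) :=
  [("title", "PDPA Part VIA — Data Breach Notification"), ("url", "https://sso.agc.gov.sg/Act/PDPA2012#PVIApr26A-")]

-- ===== PORT A =====
-- 'f.get(k) or ""' on string values equals getD with default "" (a None and an "" both yield "").
def default_legal_references_py (findings : List (List (String × String))) : List (List (String × String)) :=
  let refs := pvCoreRefs
  let types_and_ids : PySem.Set String := findings.foldl (fun acc f =>
    ((acc.add (PySem.Dict.getD ⟨f⟩ "type" "")).add
        (PySem.Dict.getD ⟨f⟩ "check_id" "")).add
      (PySem.Str.lower (PySem.Dict.getD ⟨f⟩ "title" ""))) PySem.Set.empty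
  -- " ".join over the set: joined in the set's (insertion-order) element order; Pre_ makes the result order-independent
  let combined := PySem.Str.join " " types_and_ids
  let refs := if PySem.Str.isIn "marketing" combined || PySem.Str.isIn "dnc" combined || PySem.Str.isIn "do_not_call" combined
    then refs ++ [pvRefDnc1] ++ [pvRefDnc2] else refs
  let refs := if PySem.Str.isIn "nric" combined || PySem.Str.isIn "fin" combined || PySem.Str.isIn "identity" combined
    then refs ++ [pvRefNric] else refs
  let refs := if PySem.Str.isIn "dpo" combined || PySem.Str.isIn "data protection officer" combined || PySem.Str.isIn "organizational" combined
    then refs ++ [pvRefDpo] else refs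
  let refs := if PySem.Str.isIn "breach" combined || PySem.Str.isIn "notification" combined
    then refs ++ [pvRefBreach] else refs
  refs

-- ===== PORT B =====
def pvGroups : List (List String) := [
  ["marketing", "dnc", "do_not_call"],
  ["nric", "fin", "identity"],
  ["dpo", "data protection officer", "organizational"],
  ["breach", "notification"]]

def pvExtras : List (List (List (String × String))) :=
  [[pvRefDnc1, pvRefDnc2], [pvRefNric], [pvRefDpo], [pvRefBreach]]

-- the tuple 'fields' of Source B
def pvFields (f : List (String × String)) : List String :=
  [PySem.Dict.getD ⟨f⟩ "type" "",
   PySem.Dict.getD ⟨f⟩ "check_id" "",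
   PySem.Str.lower (PySem.Dict.getD ⟨f⟩ "title" "")]

-- 'any(kw in t for t in fields for kw in kws)'
def pvHit (kws : List String) (f : List (String × String)) : Bool :=
  (pvFields f).any (fun t => kws.any (fun kw => PySem.Str.isIn kw t))

-- the for-loop of Source B: streaming pass with early break once all flags are set
def pvScan : List (List (String × String)) → List Bool → List Bool
  | [], flags => flags
  | f :: rest, flags =>
      if flags.all id then flags
      else pvScan rest (List.zipWith (fun fl kws => fl || pvHit kws f) flags pvGroups)

def default_legal_references_py_alt (findings : List (List (String × String))) : List (List (String × String)) :=
  let flags := pvScan findings [false, false, false, false]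
  (flags.zip pvExtras).foldl (fun out p => if p.1 then out ++ p.2 else out) pvCoreRefs

-- ===== PRECONDITION & SPEC =====
-- Pre_ excludes inputs on which one of the derived strings (type, check_id, lowered title) ends with
-- "data" or with "data protection": only there could the multi-word keyword "data protection officer"
-- match across element boundaries of A's " ".join over a set, whose hash-dependent iteration order
-- Python leaves unspecified — an accidental corner where no single value is A's.
def pvPreSafe (s : String) : Bool :=
  !(PySem.Str.endswith s "data") && !(PySem.Str.endswith s "data protection")
def Pre_default_legal_references_py (findings : List (List (String × String))) : Prop :=
  (findings.all (fun f =>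
    pvPreSafe (PySem.Dict.getD ⟨f⟩ "type" "") &&
    pvPreSafe (PySem.Dict.getD ⟨f⟩ "check_id" "") &&
    pvPreSafe (PySem.Str.lower (PySem.Dict.getD ⟨f⟩ "title" "")))) = true
instance (findings : List (List (String × String))) : Decidable (Pre_default_legal_references_py findings) := by
  unfold Pre_default_legal_references_py; infer_instance

def pvWitness_default_legal_references_py : (List (List (String × String))) :=
  [[("type", "marketing"), ("title", "DNC Breach")]]

def Spec_default_legal_references_py (findings : List (List (String × String))) (out : List (List (String × String))) : Prop := out = default_legal_references_py_alt findings
instance (findings : List (List (String × String))) (out : List (List (String × String))) : Decidable (Spec_default_legal_references_py findings out) := by unfold Spec_default_legal_references_py; infer_instance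

-- ===== CLAIM (what is proved, stated in full; the proofs are below) =====
def Claim_equal_default_legal_references_py : Prop := ∀ (findings : List (List (String × String))), Dom_default_legal_references_py findings → Pre_default_legal_references_py findings → Spec_default_legal_references_py findings (default_legal_references_py findings)

-- ===== LEMMAS AND PROOFS =====

-- the flat list of all derived strings (proof-side view of A's set contents / B's fields)
def pvTexts (findings : List (List (String × String))) : List String :=
  findings.flatMap pvFields

-- membership in A's accumulated set = membership in the flat list of derived strings
theorem pv_mem_tys (findings : List (List (String × String))) (acc : PySem.Set String) (x : String) :
    x ∈ findings.foldl (fun acc f =>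
      ((acc.add (PySem.Dict.getD ⟨f⟩ "type" "")).add
          (PySem.Dict.getD ⟨f⟩ "check_id" "")).add
        (PySem.Str.lower (PySem.Dict.getD ⟨f⟩ "title" ""))) acc ↔
    x ∈ acc ∨ x ∈ pvTexts findings := by
  induction findings generalizing acc with
  | nil => simp [pvTexts]
  | cons f rest ih =>
      have hsplit : pvTexts (f :: rest) = pvFields f ++ pvTexts rest := rfl
      rw [List.foldl_cons, ih, hsplit]
      simp only [PySem.Set.mem_add, List.mem_append, pvFields, List.mem_cons,
        List.not_mem_nil, or_false]
      tauto

-- any member of parts is an infix of the join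
theorem pv_infix_join_of_mem (sep p : List Char) (parts : List (List Char)) (hp : p ∈ parts) :
    p <:+: PySem.Chars.join sep parts := by
  induction parts with
  | nil => cases hp
  | cons q rest ih =>
      cases rest with
      | nil =>
          rcases List.mem_singleton.mp hp with rfl
          rw [PySem.Chars.join_singleton]
      | cons r rest' =>
          rw [PySem.Chars.join_cons_cons]
          rcases List.mem_cons.mp hp with rfl | h
          · exact ((List.prefix_append p sep).trans (List.prefix_append _ _)).isInfix
          · exact (ih h).trans (List.suffix_append _ _).isInfix

theorem pv_prefix_split {c : Char} (k u v : List Char) (h : k <+: u ++ c :: v) :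
    k <+: u ∨ ∃ k2, k = u ++ c :: k2 := by
  induction u generalizing k with
  | nil =>
      cases k with
      | nil => exact Or.inl List.nil_prefix
      | cons z k' =>
          rw [List.nil_append, List.cons_prefix_cons] at h
          exact Or.inr ⟨k', by simp [h.1]⟩
  | cons y u' ih =>
      cases k with
      | nil => exact Or.inl List.nil_prefix
      | cons z k' =>
          rw [List.cons_append, List.cons_prefix_cons] at h
          rcases ih k' h.2 with h' | ⟨k2, hk2⟩
          · exact Or.inl (by rw [h.1]; exact List.cons_prefix_cons.mpr ⟨rfl, h'⟩)
          · exact Or.inr ⟨k2, by simp [h.1, hk2]⟩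

theorem pv_infix_split {c : Char} (k a b : List Char) (h : k <:+: a ++ c :: b) :
    k <:+: a ∨ k <:+: b ∨ ∃ k1 k2, k = k1 ++ c :: k2 ∧ k1 <:+ a := by
  induction a generalizing k with
  | nil =>
      rw [List.nil_append, List.infix_cons_iff] at h
      rcases h with h | h
      · rcases pv_prefix_split k [] b (by simpa using h) with h' | ⟨k2, hk2⟩
        · exact Or.inl h'.isInfix
        · exact Or.inr (Or.inr ⟨[], k2, by simpa using hk2, List.nil_suffix⟩)
      · exact Or.inr (Or.inl h)
  | cons x a' ih =>
      rw [List.cons_append, List.infix_cons_iff] at h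
      rcases h with h | h
      · rcases pv_prefix_split k (x :: a') b (by simpa using h) with h' | ⟨k2, hk2⟩
        · exact Or.inl h'.isInfix
        · exact Or.inr (Or.inr ⟨x :: a', k2, hk2, List.suffix_rfl⟩)
      · rcases ih k h with h' | h' | ⟨k1, k2, hk, hs⟩
        · exact Or.inl (h'.trans (List.infix_cons_iff.mpr (Or.inr List.infix_rfl)))
        · exact Or.inr (Or.inl h')
        · exact Or.inr (Or.inr ⟨k1, k2, hk, hs.trans (List.suffix_cons x a')⟩)

-- master: a nonempty keyword occurs in " ".join(parts) iff it occurs in some part,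
-- provided no space-split prefix of the keyword is a suffix of a part
theorem pv_infix_join_iff (k : List Char) (hk : k ≠ []) (parts : List (List Char))
    (hcross : ∀ k1 k2, k = k1 ++ ' ' :: k2 → ∀ p ∈ parts, ¬ (k1 <:+ p)) :
    k <:+: PySem.Chars.join [' '] parts ↔ ∃ p ∈ parts, k <:+: p := by
  constructor
  · intro h
    induction parts with
    | nil =>
        rw [PySem.Chars.join_nil] at h
        exact absurd (List.eq_nil_of_infix_nil h) hk
    | cons p rest ih =>
        cases rest with
        | nil => exact ⟨p, by simp, by rwa [PySem.Chars.join_singleton] at h⟩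
        | cons q rest' =>
            rw [PySem.Chars.join_cons_cons, List.append_assoc, List.singleton_append] at h
            rcases pv_infix_split k p _ h with h' | h' | ⟨k1, k2, hk12, hs⟩
            · exact ⟨p, by simp, h'⟩
            · rcases ih (fun k1 k2 hd p' hp' => hcross k1 k2 hd p' (List.mem_cons_of_mem _ hp')) h' with ⟨p', hp', hi⟩
              exact ⟨p', List.mem_cons_of_mem _ hp', hi⟩
            · exact absurd hs (hcross k1 k2 hk12 p (by simp))
  · rintro ⟨p, hp, hi⟩
    exact hi.trans (pv_infix_join_of_mem [' '] p parts hp)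

theorem pv_phrase_split_k1 (k1 k2 : List Char) (h : "data protection officer".toList = k1 ++ ' ' :: k2) :
    k1 = "data".toList ∨ k1 = "data protection".toList := by
  have hlen : k1.length < 23 := by
    have := congrArg List.length h
    simp at this
    omega
  have htake : k1 = "data protection officer".toList.take k1.length := by
    rw [h, List.take_left]
  have hhead : ("data protection officer".toList.drop k1.length).head? = some ' ' := by
    rw [h, List.drop_left]; rfl
  have key : ∀ j, j < 23 → (("data protection officer".toList.drop j).head? = some ' ') → j = 4 ∨ j = 15 := by decide
  rcases key k1.length hlen hhead with h4 | h15
  · left; rw [htake, h4]; decide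
  · right; rw [htake, h15]; decide

-- one keyword: membership in the joined set-string equals a scan over the flat texts
theorem pv_keyword (kw : String) (hk : kw.toList ≠ []) (tys texts : List String)
    (hmem : ∀ s, s ∈ tys ↔ s ∈ texts)
    (hcross : ∀ k1 k2, kw.toList = k1 ++ ' ' :: k2 → ∀ s ∈ texts, ¬ (k1 <:+ s.toList)) :
    PySem.Str.isIn kw (PySem.Str.join " " tys) = texts.any (fun t => PySem.Str.isIn kw t) := by
  have h1 : PySem.Str.isIn kw (PySem.Str.join " " tys) = true ↔
      texts.any (fun t => PySem.Str.isIn kw t) = true := by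
    rw [PySem.Str.isIn_iff_infix, PySem.Str.toList_join]
    have hsep : (" " : String).toList = [' '] := rfl
    rw [hsep, pv_infix_join_iff kw.toList hk (tys.map String.toList)
      (by rintro k1 k2 hd p hp
          rcases List.mem_map.mp hp with ⟨s, hs, rfl⟩
          exact hcross k1 k2 hd s ((hmem s).mp hs))]
    simp only [List.any_eq_true, PySem.Str.isIn_iff_infix, List.mem_map]
    constructor
    · rintro ⟨p, ⟨s, hs, rfl⟩, hi⟩
      exact ⟨s, (hmem s).mp hs, hi⟩
    · rintro ⟨s, hs, hi⟩
      exact ⟨s.toList, ⟨s, (hmem s).mpr hs, rfl⟩, hi⟩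
  exact Bool.eq_iff_iff.mpr h1

-- a space-free keyword never splits at a space
theorem pv_nospace_cross (kw : String) (hsp : ' ' ∉ kw.toList) (texts : List String) :
    ∀ k1 k2, kw.toList = k1 ++ ' ' :: k2 → ∀ s ∈ texts, ¬ (k1 <:+ s.toList) := by
  intro k1 k2 hd s _ _
  exact hsp (by rw [hd]; simp)

-- '||' distributes out of 'any'
theorem pv_any_or {α : Type} (l : List α) (p q : α → Bool) :
    l.any (fun x => p x || q x) = (l.any p || l.any q) := by
  induction l with
  | nil => rfl
  | cons a t ih =>
      simp only [List.any_cons, ih]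
      cases p a <;> cases q a <;> simp [Bool.or_comm]

-- 'any' over the concatenated fields = 'any' over the findings of a per-finding 'any'
theorem pv_any_texts (findings : List (List (String × String))) (p : String → Bool) :
    (pvTexts findings).any p = findings.any (fun f => (pvFields f).any p) := by
  induction findings with
  | nil => rfl
  | cons f rest ih =>
      have hsplit : pvTexts (f :: rest) = pvFields f ++ pvTexts rest := rfl
      rw [hsplit]
      simp [List.any_append, ih]

-- B's streaming scan computes, for each group, exactly 'some finding hits the group'
theorem pv_scan_eq (findings : List (List (String × String))) (a b c d : Bool) :
    pvScan findings [a, b, c, d] =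
      [a || findings.any (pvHit ["marketing", "dnc", "do_not_call"]),
       b || findings.any (pvHit ["nric", "fin", "identity"]),
       c || findings.any (pvHit ["dpo", "data protection officer", "organizational"]),
       d || findings.any (pvHit ["breach", "notification"])] := by
  induction findings generalizing a b c d with
  | nil => simp [pvScan]
  | cons f rest ih =>
      rw [pvScan]
      by_cases hall : ([a, b, c, d].all id) = true
      · rw [if_pos hall]
        simp only [List.all_cons, List.all_nil, id, Bool.and_eq_true, and_true] at hall
        obtain ⟨ha, hb, hc, hd⟩ := hall
        subst ha; subst hb; subst hc; subst hd
        simp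
      · rw [if_neg hall]
        simp only [pvGroups, List.zipWith]
        rw [ih]
        simp [List.any_cons, Bool.or_assoc]

set_option maxHeartbeats 1000000 in
-- ===== VERDICT (by name: the statement is the Claim_ definition above) =====
theorem default_legal_references_py_spec : Claim_equal_default_legal_references_py := by
  intro findings hdom hpre
  unfold Spec_default_legal_references_py default_legal_references_py default_legal_references_py_alt
  set T := findings.foldl (fun acc f =>
    ((acc.add (PySem.Dict.getD ⟨f⟩ "type" "")).add
        (PySem.Dict.getD ⟨f⟩ "check_id" "")).add
      (PySem.Str.lower (PySem.Dict.getD ⟨f⟩ "title" ""))) PySem.Set.empty with hT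
  have hmem : ∀ s, s ∈ T ↔ s ∈ pvTexts findings := by
    intro s
    rw [hT, pv_mem_tys findings PySem.Set.empty s]
    simp [PySem.Set.empty]
  have hsafe : ∀ s ∈ pvTexts findings, pvPreSafe s = true := by
    intro s hs
    unfold Pre_default_legal_references_py at hpre
    rw [List.all_eq_true] at hpre
    rcases List.mem_flatMap.mp hs with ⟨f, hf, ht⟩
    have hh := hpre f hf
    simp only [Bool.and_eq_true] at hh
    simp only [pvFields, List.mem_cons, List.not_mem_nil, or_false] at ht
    rcases ht with rfl | rfl | rfl
    · exact hh.1.1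
    · exact hh.1.2
    · exact hh.2
  have hcross : ∀ k1 k2, ("data protection officer" : String).toList = k1 ++ ' ' :: k2 →
      ∀ s ∈ pvTexts findings, ¬ (k1 <:+ s.toList) := by
    intro k1 k2 hd s hs hsuf
    have hps := hsafe s hs
    unfold pvPreSafe at hps
    simp only [Bool.and_eq_true, Bool.not_eq_true'] at hps
    rcases pv_phrase_split_k1 k1 k2 hd with rfl | rfl
    · have h1 := hps.1
      rw [PySem.Str.endswith_eq] at h1
      exact absurd ((PySem.Chars.endswith_iff s.toList "data".toList).mpr hsuf)
        (by simpa using h1)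
    · have h2 := hps.2
      rw [PySem.Str.endswith_eq] at h2
      exact absurd ((PySem.Chars.endswith_iff s.toList "data protection".toList).mpr hsuf)
        (by simpa using h2)
  have e1 := pv_keyword "marketing" (by decide) T (pvTexts findings) hmem (pv_nospace_cross _ (by decide) _)
  have e2 := pv_keyword "dnc" (by decide) T (pvTexts findings) hmem (pv_nospace_cross _ (by decide) _)
  have e3 := pv_keyword "do_not_call" (by decide) T (pvTexts findings) hmem (pv_nospace_cross _ (by decide) _)
  have e4 := pv_keyword "nric" (by decide) T (pvTexts findings) hmem (pv_nospace_cross _ (by decide) _)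
  have e5 := pv_keyword "fin" (by decide) T (pvTexts findings) hmem (pv_nospace_cross _ (by decide) _)
  have e6 := pv_keyword "identity" (by decide) T (pvTexts findings) hmem (pv_nospace_cross _ (by decide) _)
  have e7 := pv_keyword "dpo" (by decide) T (pvTexts findings) hmem (pv_nospace_cross _ (by decide) _)
  have e8 := pv_keyword "data protection officer" (by decide) T (pvTexts findings) hmem hcross
  have e9 := pv_keyword "organizational" (by decide) T (pvTexts findings) hmem (pv_nospace_cross _ (by decide) _)
  have e10 := pv_keyword "breach" (by decide) T (pvTexts findings) hmem (pv_nospace_cross _ (by decide) _)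
  have e11 := pv_keyword "notification" (by decide) T (pvTexts findings) hmem (pv_nospace_cross _ (by decide) _)
  -- each of B's group flags equals the corresponding disjunction of A's keyword tests
  have hg3 : ∀ (k1 k2 k3 : String),
      findings.any (pvHit [k1, k2, k3]) =
        ((pvTexts findings).any (fun t => PySem.Str.isIn k1 t) ||
         ((pvTexts findings).any (fun t => PySem.Str.isIn k2 t) ||
          (pvTexts findings).any (fun t => PySem.Str.isIn k3 t))) := by
    intro k1 k2 k3
    have h0 : findings.any (pvHit [k1, k2, k3]) =
        (pvTexts findings).any (fun t => PySem.Str.isIn k1 t ||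
          (PySem.Str.isIn k2 t || PySem.Str.isIn k3 t)) := by
      rw [pv_any_texts]
      refine congrArg (List.any findings) (funext fun f => ?_)
      simp [pvHit]
    rw [h0, pv_any_or (pvTexts findings) (fun t => PySem.Str.isIn k1 t)
          (fun t => PySem.Str.isIn k2 t || PySem.Str.isIn k3 t),
        pv_any_or (pvTexts findings) (fun t => PySem.Str.isIn k2 t)
          (fun t => PySem.Str.isIn k3 t)]
  have hg2 : ∀ (k1 k2 : String),
      findings.any (pvHit [k1, k2]) =
        ((pvTexts findings).any (fun t => PySem.Str.isIn k1 t) ||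
         (pvTexts findings).any (fun t => PySem.Str.isIn k2 t)) := by
    intro k1 k2
    have h0 : findings.any (pvHit [k1, k2]) =
        (pvTexts findings).any (fun t => PySem.Str.isIn k1 t || PySem.Str.isIn k2 t) := by
      rw [pv_any_texts]
      refine congrArg (List.any findings) (funext fun f => ?_)
      simp [pvHit]
    rw [h0, pv_any_or (pvTexts findings) (fun t => PySem.Str.isIn k1 t)
          (fun t => PySem.Str.isIn k2 t)]
  rw [pv_scan_eq findings false false false false]
  simp only [Bool.false_or, hg3, hg2, pvExtras, List.zip, List.zipWith, List.foldl_cons, List.foldl_nil]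
  rw [e1, e2, e3, e4, e5, e6, e7, e8, e9, e10, e11]
  simp only [Bool.or_assoc, List.append_assoc, List.cons_append, List.nil_append]
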